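-- pv_equiv track=rewrite | github.com/mdn/browsercompat | mdn/utils.py | join_content
-- ===== SOURCE A (Python) =====
-- def join_content(content_bits):
--     """Construct a string with just the right whitespace."""
--     out = ''
--     nospace_before = '!,.;?[ '
--     nospace_after = ' '
--     for bit in content_bits:
--         if bit:
--             if (out and out[-1] not in nospace_after and
--                     bit[0] not in nospace_before):
--                 out += ' '
--             out += bit
--     return out
-- ===== SOURCE B (Python) =====
-- def join_content(content_bits):
--     """Construct a string with just the right whitespace."""
--     # Build the result right-to-left: walk the bits in reverse, keeping the
--     # first character of the suffix assembled so far to decide the space.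
--     suffix_parts = []
--     suffix_start = ''
--     for bit in reversed(content_bits):
--         if not bit:
--             continue
--         if suffix_start and bit[-1] != ' ' and suffix_start not in '!,.;?[ ':
--             suffix_parts.append(' ')
--         suffix_parts.append(bit)
--         suffix_start = bit[0]
--     return ''.join(reversed(suffix_parts))
-- ===== Notes on version B (the rewrite author's own statement) =====
-- stated objective: alternative
-- what changed: B constructs the result back-to-front: it walks the bits in reverse, tracking the first character of the suffix built so far to decide each separator, instead of A's forward accumulator that re-inspects its own last character.
import Mathlib
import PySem

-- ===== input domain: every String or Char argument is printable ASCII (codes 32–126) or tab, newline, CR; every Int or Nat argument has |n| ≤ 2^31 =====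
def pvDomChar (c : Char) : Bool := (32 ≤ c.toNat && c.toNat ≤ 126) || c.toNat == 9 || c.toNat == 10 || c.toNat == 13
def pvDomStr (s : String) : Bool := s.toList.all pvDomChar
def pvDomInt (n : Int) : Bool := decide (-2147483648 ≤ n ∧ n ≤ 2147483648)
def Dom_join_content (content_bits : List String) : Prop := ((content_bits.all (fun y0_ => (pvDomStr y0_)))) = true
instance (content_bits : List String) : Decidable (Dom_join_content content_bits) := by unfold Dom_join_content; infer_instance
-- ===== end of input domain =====

-- B builds the result right-to-left (a reversed pass tracking the first character of the suffix built so far) instead of A's forward accumulator inspecting its own last character; same cost, different traversal.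


-- nospace_before = '!,.;?[ '  (shared character class; nospace_after = ' ' is inlined as the single char ' ')
def jcNospaceBefore : List Char := ['!', ',', '.', ';', '?', '[', ' ']

-- ===== PORT A =====
-- loop over content_bits with the accumulator `out`; `out[-1]` / `bit[0]` are total here
-- because the Python guards (`out and …`, `if bit:`) ensure nonemptiness, so getLast?/head? are exact.
def jcGo (out : List Char) : List String → List Char
  | [] => out
  | bit :: rest =>
    if !bit.toList.isEmpty then
      let out' := if !out.isEmpty && out.getLast? != some ' '
                     && bit.toList.head?.all (fun c => !jcNospaceBefore.contains c)
                  then out ++ [' '] else out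
      jcGo (out' ++ bit.toList) rest
    else jcGo out rest

def join_content (content_bits : List String) : String :=
  String.ofList (jcGo [] content_bits)

-- ===== PORT B =====
-- one step of Source B's reversed loop; the state is (suffix_parts, suffix_start).
-- Python's suffix_start is '' or a one-character string: ported as Option Char (none = '').
def jcStepB (st : List (List Char) × Option Char) (bit : String) : List (List Char) × Option Char :=
  if bit.toList.isEmpty then st
  else
    let parts := if st.2.elim false
                    (fun c => bit.toList.getLast? != some ' ' && !jcNospaceBefore.contains c)
                 then st.1 ++ [[' ']] else st.1
    (parts ++ [bit.toList], bit.toList.head?)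

def join_content_alt (content_bits : List String) : String :=
  let st := content_bits.reverse.foldl jcStepB ([], none)
  String.ofList st.1.reverse.flatten

-- ===== PRECONDITION & SPEC =====
def Spec_join_content (content_bits : List String) (out : String) : Prop := out = join_content_alt content_bits
instance (content_bits : List String) (out : String) : Decidable (Spec_join_content content_bits out) := by unfold Spec_join_content; infer_instance

-- ===== CLAIM (what is proved, stated in full; the proofs are below) =====
def Claim_equal_join_content : Prop := ∀ (content_bits : List String), Dom_join_content content_bits → Spec_join_content content_bits (join_content content_bits)

-- ===== LEMMAS AND PROOFS =====

-- separator the joined text carries between adjacent non-empty bits prev, cur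
def jcSep (prev cur : String) : List Char :=
  if prev.toList.getLast? != some ' '
     && cur.toList.head?.all (fun c => !jcNospaceBefore.contains c)
  then [' '] else []

-- common recursive specification: the text produced after a non-empty bit `prev`
def jcRest (prev : String) : List String → List Char
  | [] => []
  | c :: rest => jcSep prev c ++ c.toList ++ jcRest c rest

-- the joined text of a list of non-empty bits
def jcJoined : List String → List Char
  | [] => []
  | b :: rest => b.toList ++ jcRest b rest

-- ---- A side ----
theorem jcGo_filter (l : List String) : ∀ out,
    jcGo out l = jcGo out (l.filter (fun b => !b.toList.isEmpty)) := by
  induction l with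
  | nil => intro out; rfl
  | cons b rest ih =>
    intro out
    by_cases h : (!b.toList.isEmpty) = true
    · simp [jcGo, h, ih]
    · simp only [Bool.not_eq_true] at h
      simp [jcGo, h, ih]

theorem jcGo_main (l : List String) : ∀ (prev : String) (out : List Char),
    (∀ b ∈ l, b.toList ≠ []) → out ≠ [] → out.getLast? = prev.toList.getLast? →
    jcGo out l = out ++ jcRest prev l := by
  induction l with
  | nil => intro prev out _ _ _; simp [jcGo, jcRest]
  | cons b rest ih =>
    intro prev out hne hout hlast
    have hb : b.toList ≠ [] := hne b (by simp)
    have hb' : (!b.toList.isEmpty) = true := by simpa [List.isEmpty_iff] using hb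
    have hout' : (!out.isEmpty) = true := by simpa [List.isEmpty_iff] using hout
    have hrest : ∀ x ∈ rest, x.toList ≠ [] := fun x hx => hne x (by simp [hx])
    simp only [jcGo, hb', if_pos]
    have hsep : (if (!out.isEmpty && out.getLast? != some ' '
                     && b.toList.head?.all (fun c => !jcNospaceBefore.contains c))
                 then out ++ [' '] else out) = out ++ jcSep prev b := by
      unfold jcSep
      rw [hlast]
      simp only [hout', Bool.true_and]
      split <;> simp
    rw [hsep]
    have := ih b ((out ++ jcSep prev b) ++ b.toList) hrest
      (by simp [hb]) (by rw [List.getLast?_append_of_ne_nil _ hb])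
    simp only [this, jcRest]
    simp

-- A's result is the joined text of the non-empty bits
theorem jcA_joined (l : List String) :
    jcGo [] l = jcJoined (l.filter (fun b => !b.toList.isEmpty)) := by
  rw [jcGo_filter]
  cases hf : l.filter (fun b => !b.toList.isEmpty) with
  | nil => rfl
  | cons b0 rest =>
    have hb0 : b0.toList ≠ [] := by
      have : b0 ∈ l.filter (fun b => !b.toList.isEmpty) := by simp [hf]
      have := List.of_mem_filter this
      simpa [List.isEmpty_iff] using this
    have hrest : ∀ x ∈ rest, x.toList ≠ [] := by
      intro x hx
      have : x ∈ l.filter (fun b => !b.toList.isEmpty) := by simp [hf, hx]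
      have := List.of_mem_filter this
      simpa [List.isEmpty_iff] using this
    have hb0' : (!b0.toList.isEmpty) = true := by simpa [List.isEmpty_iff] using hb0
    simp only [jcGo, hb0', if_pos]
    have h0 : (if (!([] : List Char).isEmpty && ([] : List Char).getLast? != some ' '
                  && b0.toList.head?.all (fun c => !jcNospaceBefore.contains c))
               then ([] : List Char) ++ [' '] else []) = ([] : List Char) := by simp
    rw [h0]
    rw [jcGo_main rest b0 (([] : List Char) ++ b0.toList) hrest (by simp [hb0]) (by simp)]
    simp [jcJoined]

-- ---- B side ----
-- the reversed fold skips empty bits, so it may as well fold over the reversed filtered list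
theorem jcFoldB_filter (l : List String) : ∀ st,
    l.foldl jcStepB st = (l.filter (fun b => !b.toList.isEmpty)).foldl jcStepB st := by
  induction l with
  | nil => intro st; rfl
  | cons b rest ih =>
    intro st
    by_cases h : b.toList.isEmpty = true
    · have : jcStepB st b = st := by simp [jcStepB, h]
      simp [h, this, ih]
    · simp only [Bool.not_eq_true] at h
      simp [h, ih]

-- invariant of the reversed fold over a list S of non-empty bits:
-- the flattened reversed parts are the joined text of S, and the tracked char is its first bit's first char
theorem jcFoldB_main (S : List String) (hS : ∀ b ∈ S, b.toList ≠ []) :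
    (S.reverse.foldl jcStepB ([], none)).1.reverse.flatten = jcJoined S ∧
    (S.reverse.foldl jcStepB ([], none)).2 = (S.head?.bind (fun b => b.toList.head?)) := by
  induction S with
  | nil => simp [jcJoined]
  | cons b rest ih =>
    have hb : b.toList ≠ [] := hS b (by simp)
    have hb' : b.toList.isEmpty = false := by simpa [List.isEmpty_iff] using hb
    have hrest : ∀ x ∈ rest, x.toList ≠ [] := fun x hx => hS x (by simp [hx])
    obtain ⟨ih1, ih2⟩ := ih hrest
    have hfold : (b :: rest).reverse.foldl jcStepB ([], none)
        = jcStepB (rest.reverse.foldl jcStepB ([], none)) b := by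
      simp [List.reverse_cons, List.foldl_append]
    rcases hst : rest.reverse.foldl jcStepB ([], none) with ⟨parts, start⟩
    rw [hst] at ih1 ih2
    cases rest with
    | nil =>
      have hstnil : (([], none) : List (List Char) × Option Char) = (parts, start) := hst
      obtain ⟨hp, hs⟩ : parts = [] ∧ start = none := by
        constructor <;> [exact (congrArg Prod.fst hstnil).symm; exact (congrArg Prod.snd hstnil).symm]
      rw [hfold, hst, hp, hs]
      simp [jcStepB, hb', jcJoined, jcRest]
    | cons c rest' =>
      have hc : c.toList ≠ [] := hrest c (by simp)
      obtain ⟨ch, ctl, hctl⟩ : ∃ ch ctl, c.toList = ch :: ctl := by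
        cases h : c.toList with
        | nil => exact absurd h hc
        | cons x xs => exact ⟨x, xs, rfl⟩
      have hstart : start = some ch := by simpa [hctl] using ih2
      have hsepeq : jcSep b c
          = (if (b.toList.getLast? != some ' ' && !jcNospaceBefore.contains ch)
             then [' '] else []) := by
        simp [jcSep, hctl]
      rw [hfold, hst]
      simp only [jcStepB, hb', Bool.false_eq_true, Option.elim, hstart]
      refine ⟨?_, by simp⟩
      simp only [jcJoined, jcRest] at ih1 ⊢
      by_cases hP : (¬b.toList.getLast? = some ' ' ∧ ch ∉ jcNospaceBefore)
      · have hsep' : jcSep b c = [' '] := by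
          rw [hsepeq, if_pos (by simp [hP.1, hP.2])]
        simp [if_pos hP, hsep', ih1]
      · have hsep' : jcSep b c = [] := by
          rw [hsepeq, if_neg (by simpa using hP)]
        simp [if_neg hP, hsep', ih1]
-- ===== VERDICT (by name: the statement is the Claim_ definition above) =====
theorem join_content_spec : Claim_equal_join_content := by
  intro l _
  unfold Spec_join_content join_content join_content_alt
  rw [jcA_joined]
  have hfilt : l.reverse.foldl jcStepB ([], none)
      = (l.filter (fun b => !b.toList.isEmpty)).reverse.foldl jcStepB ([], none) := by
    rw [jcFoldB_filter, List.filter_reverse]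
  have hne : ∀ b ∈ l.filter (fun b => !b.toList.isEmpty), b.toList ≠ [] := by
    intro b hb
    have := List.of_mem_filter hb
    simpa [List.isEmpty_iff] using this
  have := (jcFoldB_main (l.filter (fun b => !b.toList.isEmpty)) hne).1
  simp only [hfilt, this]
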